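-- pv_equiv track=rewrite | github.com/Joshua992700/ESEC-Portal | largest_element_with_max_neighbor_product.py | largest_element_with_max_neighbor_product
-- ===== SOURCE A (Python) =====
-- def largest_element_with_max_neighbor_product(arr):
--     n = len(arr)
--     if n < 3:
--         return -1  # Not enough elements to have a valid middle element
--
--     max_product = float('-inf')
--     result_element = -1
--
--     for i in range(1, n - 1):
--         product = arr[i - 1] * arr[i + 1]
--         if product > max_product:
--             max_product = product
--             result_element = arr[i]
--
--     return result_element
-- ===== SOURCE B (Python) =====
-- def largest_element_with_max_neighbor_product(arr):
--     n = len(arr)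
--     if n < 3:
--         return -1  # Not enough elements to have a valid middle element
--     # Divide and conquer over the window indices [lo, hi): each window i has
--     # neighbor product arr[i]*arr[i+2] and middle arr[i+1]; the combine step
--     # prefers the left half on ties, which yields the leftmost maximum.
--     def best(lo, hi):
--         if hi - lo == 1:
--             return (arr[lo] * arr[lo + 2], arr[lo + 1])
--         mid = (lo + hi) // 2
--         l = best(lo, mid)
--         r = best(mid, hi)
--         return l if r[0] <= l[0] else r
--     return best(0, n - 2)[1]
-- ===== Notes on version B (the rewrite author's own statement) =====
-- stated objective: alternative
-- what changed: Replaces A's fused left-to-right running-max loop by a divide-and-conquer recursion over the window index range, combining halves with a left-biased maximum to preserve first-occurrence tie-breaking.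
import Mathlib
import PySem

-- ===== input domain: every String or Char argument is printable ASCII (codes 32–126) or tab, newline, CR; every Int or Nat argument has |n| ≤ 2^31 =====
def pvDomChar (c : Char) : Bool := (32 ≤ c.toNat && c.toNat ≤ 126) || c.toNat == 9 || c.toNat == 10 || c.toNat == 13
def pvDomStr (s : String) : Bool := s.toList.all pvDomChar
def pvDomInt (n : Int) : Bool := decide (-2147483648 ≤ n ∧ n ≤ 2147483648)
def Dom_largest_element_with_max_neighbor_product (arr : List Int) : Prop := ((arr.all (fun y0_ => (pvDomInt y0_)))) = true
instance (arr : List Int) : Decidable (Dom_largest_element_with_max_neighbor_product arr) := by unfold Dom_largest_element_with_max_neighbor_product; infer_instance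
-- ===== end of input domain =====

-- B replaces A's fused running-max loop by a divide-and-conquer recursion over window indices with a left-biased combine (alternative decomposition, same cost).

-- ===== PORT A =====
def largest_element_with_max_neighbor_product (arr : List Int) : Int :=
  let n := arr.length
  if n < 3 then -1
  else
    let st := (PySem.List.pyRange 1 ((n : Int) - 1)).foldl
      (fun (st : Option Int × Int) i =>
        let product := PySem.List.pyGetD arr (i - 1) 0 * PySem.List.pyGetD arr (i + 1) 0
        match st.1 with
        | none => (some product, PySem.List.pyGetD arr i 0)
        | some mp => if mp < product then (some product, PySem.List.pyGetD arr i 0) else st)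
      (none, -1)
    st.2

-- ===== PORT B =====
-- the recursion best(lo, hi) of Source B; the fuel argument only makes the recursion
-- structurally terminating (callers always pass enough fuel), indices are always in range
-- so getD matches Python's arr[...]
def pvBestB (arr : List Int) : Nat → Nat → Nat → Int × Int
  | 0, _, _ => (0, -1)   -- fuel exhausted: unreachable when fuel ≥ hi - lo ≥ 1
  | fuel + 1, lo, hi =>
    if hi - lo = 1 then (arr.getD lo 0 * arr.getD (lo + 2) 0, arr.getD (lo + 1) 0)
    else
      let mid := (lo + hi) / 2
      let l := pvBestB arr fuel lo mid
      let r := pvBestB arr fuel mid hi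
      if r.1 ≤ l.1 then l else r

def largest_element_with_max_neighbor_product_alt (arr : List Int) : Int :=
  let n := arr.length
  if n < 3 then -1
  else (pvBestB arr (n - 2) 0 (n - 2)).2

-- ===== PRECONDITION & SPEC =====
def Spec_largest_element_with_max_neighbor_product (arr : List Int) (out : Int) : Prop := out = largest_element_with_max_neighbor_product_alt arr
instance (arr : List Int) (out : Int) : Decidable (Spec_largest_element_with_max_neighbor_product arr out) := by unfold Spec_largest_element_with_max_neighbor_product; infer_instance

-- ===== CLAIM (what is proved, stated in full; the proofs are below) =====
def Claim_equal_largest_element_with_max_neighbor_product : Prop := ∀ (arr : List Int), Dom_largest_element_with_max_neighbor_product arr → Spec_largest_element_with_max_neighbor_product arr (largest_element_with_max_neighbor_product arr)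

-- ===== LEMMAS AND PROOFS =====

-- A's loop step on a (product, middle) pair.
def pvStep (st : Option Int × Int) (q : Int × Int) : Option Int × Int :=
  match st.1 with
  | none => (some q.1, q.2)
  | some mp => if mp < q.1 then (some q.1, q.2) else st

-- the (product, middle) pairs A's loop ranges over
def pvPairs (arr : List Int) : List (Int × Int) :=
  (List.zipWith (· * ·) arr (arr.drop 2)).zip (arr.drop 1)

-- left-biased maximum on the product component (the semantics of both programs' choice)
def pvComb (a b : Int × Int) : Int × Int := if a.1 < b.1 then b else a

-- the (product, middle) pair of window index i
def pvPairAt (arr : List Int) (i : Nat) : Int × Int :=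
  (arr.getD i 0 * arr.getD (i + 2) 0, arr.getD (i + 1) 0)

theorem pvPairs_length (arr : List Int) : (pvPairs arr).length = arr.length - 2 := by
  simp [pvPairs]; omega

theorem pvPairs_getElem (arr : List Int) (k : Nat) (hk : k < (pvPairs arr).length) :
    (pvPairs arr)[k] =
      (arr[k]'(by rw [pvPairs_length] at hk; omega) *
         arr[k+2]'(by rw [pvPairs_length] at hk; omega),
       arr[k+1]'(by rw [pvPairs_length] at hk; omega)) := by
  have h := hk
  rw [pvPairs_length] at h
  simp [pvPairs, Nat.add_comm]

theorem pvPairs_eq_map (arr : List Int) :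
    pvPairs arr = (List.range' 0 (arr.length - 2)).map (pvPairAt arr) := by
  apply List.ext_getElem
  · simp [pvPairs_length]
  · intro k h1 h2
    rw [pvPairs_getElem]
    have hk : k < arr.length - 2 := by rw [pvPairs_length] at h1; omega
    simp only [List.getElem_map, List.getElem_range']
    simp only [pvPairAt, Nat.zero_add]
    rw [List.getD_eq_getElem _ _ (by omega), List.getD_eq_getElem _ _ (by omega),
      List.getD_eq_getElem _ _ (by omega)]
    simp

-- A's indexed loop equals the fold of pvStep over pvPairs
theorem pvA_eq_fold (arr : List Int) (h : 3 ≤ arr.length) :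
    largest_element_with_max_neighbor_product arr =
      ((pvPairs arr).foldl pvStep (none, -1)).2 := by
  unfold largest_element_with_max_neighbor_product
  rw [if_neg (by omega : ¬ arr.length < 3)]
  have hlen : (((0:Int),(0:Int)) :: pvPairs arr).length = arr.length - 1 := by
    simp [pvPairs_length]; omega
  have hcong := PySem.List.foldl_congr_mem
    (PySem.List.pyRange 1 ((arr.length : Int) - 1))
    (fun (st : Option Int × Int) i =>
        let product := PySem.List.pyGetD arr (i - 1) 0 * PySem.List.pyGetD arr (i + 1) 0
        match st.1 with
        | none => (some product, PySem.List.pyGetD arr i 0)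
        | some mp => if mp < product then (some product, PySem.List.pyGetD arr i 0) else st)
    (fun st i => pvStep st (PySem.List.pyGetD (((0:Int),(0:Int)) :: pvPairs arr) i ((0:Int),(0:Int))))
    (none, -1) ?_
  · rw [hcong]
    have hcast : (arr.length : Int) - 1 = ((((0:Int),(0:Int)) :: pvPairs arr).length : Int) := by
      rw [hlen]; omega
    rw [hcast, PySem.List.foldl_pyRange_pyGetD' _ _ _ _ (by norm_num : (0:Int) ≤ 1)]
    norm_num
  · intro st i hi
    rw [PySem.List.mem_pyRange_one] at hi
    obtain ⟨h1, h2⟩ := hi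
    obtain ⟨k, hk⟩ : ∃ k, i = ((k + 1 : Nat) : Int) := ⟨i.toNat - 1, by omega⟩
    have hkb : k + 3 ≤ arr.length := by omega
    subst hk
    have hm3 : k < (pvPairs arr).length := by rw [pvPairs_length]; omega
    have e1 : PySem.List.pyGetD arr (((k + 1 : Nat) : Int) - 1) 0 = arr[k]'(by omega) := by
      rw [show ((k + 1 : Nat) : Int) - 1 = ((k : Nat) : Int) by push_cast; ring, PySem.List.pyGetD_natCast,
        List.getD_eq_getElem _ _ (by omega)]
    have e2 : PySem.List.pyGetD arr (((k + 1 : Nat) : Int) + 1) 0 = arr[k + 2]'(by omega) := by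
      rw [show ((k + 1 : Nat) : Int) + 1 = ((k + 2 : Nat) : Int) by push_cast; ring, PySem.List.pyGetD_natCast,
        List.getD_eq_getElem _ _ (by omega)]
    have e3 : PySem.List.pyGetD arr ((k + 1 : Nat) : Int) 0 = arr[k + 1]'(by omega) := by
      rw [PySem.List.pyGetD_natCast, List.getD_eq_getElem _ _ (by omega)]
    have e0 : PySem.List.pyGetD (((0:Int),(0:Int)) :: pvPairs arr) ((k + 1 : Nat) : Int) ((0:Int),(0:Int))
        = (arr[k]'(by omega) * arr[k+2]'(by omega), arr[k+1]'(by omega)) := by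
      rw [PySem.List.pyGetD_natCast, List.getD_cons_succ,
        List.getD_eq_getElem _ _ hm3, pvPairs_getElem]
    simp only [e0, e1, e2, e3, pvStep]

-- once the first pair is absorbed, A's fold is the pvComb fold
theorem pvStep_fold (t : List (Int × Int)) (p : Int × Int) :
    t.foldl pvStep (some p.1, p.2) = (some (t.foldl pvComb p).1, (t.foldl pvComb p).2) := by
  induction t generalizing p with
  | nil => rfl
  | cons q t ih =>
      simp only [List.foldl_cons]
      have hstep : pvStep (some p.1, p.2) q = (some (pvComb p q).1, (pvComb p q).2) := by
        simp only [pvStep, pvComb]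
        split_ifs <;> rfl
      rw [hstep, ih]

theorem pvRange'_cons (s n : Nat) (h : 0 < n) :
    List.range' s n = s :: List.range' (s + 1) (n - 1) := by
  obtain ⟨m, rfl⟩ : ∃ m, n = m + 1 := ⟨n - 1, by omega⟩
  rfl

theorem pvRange'_add (s a b : Nat) :
    List.range' s (a + b) = List.range' s a ++ List.range' (s + a) b := by
  induction a generalizing s with
  | zero => simp
  | succ a ih =>
      rw [show a + 1 + b = (a + b) + 1 by omega]
      show s :: List.range' (s + 1) (a + b) = (s :: List.range' (s + 1) a) ++ _
      rw [ih (s + 1), show s + 1 + a = s + (a + 1) by omega]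
      rfl

theorem pvComb_assoc (a b c : Int × Int) : pvComb (pvComb a b) c = pvComb a (pvComb b c) := by
  simp only [pvComb]
  split_ifs <;> first | rfl | omega

theorem pvFoldl_comb_assoc (l : List (Int × Int)) (a b : Int × Int) :
    l.foldl pvComb (pvComb a b) = pvComb a (l.foldl pvComb b) := by
  induction l generalizing b with
  | nil => rfl
  | cons x t ih => simp only [List.foldl_cons, pvComb_assoc, ih]

-- the divide-and-conquer recursion computes the left-biased maximum over its window range
theorem pvBestB_spec (arr : List Int) (fuel lo hi : Nat) (h1 : lo < hi) (h2 : hi - lo ≤ fuel) :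
    pvBestB arr fuel lo hi =
      ((List.range' (lo + 1) (hi - lo - 1)).map (pvPairAt arr)).foldl pvComb (pvPairAt arr lo) := by
  induction fuel generalizing lo hi with
  | zero => omega
  | succ fuel ih =>
      by_cases hb : hi - lo = 1
      · have : hi = lo + 1 := by omega
        subst this
        simp [pvBestB, pvPairAt]
      · have hlo2 : lo + 2 ≤ hi := by omega
        have hmid1 : lo < (lo + hi) / 2 := by omega
        have hmid2 : (lo + hi) / 2 < hi := by omega
        rw [show pvBestB arr (fuel + 1) lo hi =
            (if ((pvBestB arr fuel ((lo + hi) / 2) hi).1 ≤ (pvBestB arr fuel lo ((lo + hi) / 2)).1)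
              then pvBestB arr fuel lo ((lo + hi) / 2) else pvBestB arr fuel ((lo + hi) / 2) hi)
          from by simp [pvBestB, hb]]
        set m := (lo + hi) / 2 with hm
        rw [ih lo m hmid1 (by omega), ih m hi hmid2 (by omega)]
        set L := ((List.range' (lo + 1) (m - lo - 1)).map (pvPairAt arr)).foldl pvComb (pvPairAt arr lo) with hL
        set R := ((List.range' (m + 1) (hi - m - 1)).map (pvPairAt arr)).foldl pvComb (pvPairAt arr m) with hR
        have hsplit : List.range' (lo + 1) (hi - lo - 1) =
            List.range' (lo + 1) (m - lo - 1) ++ (m :: List.range' (m + 1) (hi - m - 1)) := by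
          rw [show hi - lo - 1 = (m - lo - 1) + (hi - m) by omega, pvRange'_add,
            show lo + 1 + (m - lo - 1) = m by omega, pvRange'_cons m (hi - m) (by omega)]
        rw [hsplit, List.map_append, List.foldl_append, List.map_cons, List.foldl_cons, ← hL,
          pvFoldl_comb_assoc, ← hR]
        simp only [pvComb]
        split_ifs <;> first | rfl | omega

-- ===== VERDICT (by name: the statement is the Claim_ definition above) =====
theorem largest_element_with_max_neighbor_product_spec : Claim_equal_largest_element_with_max_neighbor_product := by
  intro arr _
  unfold Spec_largest_element_with_max_neighbor_product
  by_cases h : 3 ≤ arr.length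
  · rw [pvA_eq_fold arr h]
    unfold largest_element_with_max_neighbor_product_alt
    rw [if_neg (by omega : ¬ arr.length < 3)]
    rw [pvBestB_spec arr (arr.length - 2) 0 (arr.length - 2) (by omega) (by omega)]
    rw [pvPairs_eq_map]
    rw [pvRange'_cons 0 (arr.length - 2) (by omega)]
    rw [List.map_cons, List.foldl_cons]
    rw [show pvStep (none, -1) (pvPairAt arr 0) = (some (pvPairAt arr 0).1, (pvPairAt arr 0).2) from rfl]
    rw [pvStep_fold]
    rfl
  · unfold largest_element_with_max_neighbor_product largest_element_with_max_neighbor_product_alt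
    rw [if_pos (by omega), if_pos (by omega)]
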